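-- pv_equiv track=rewrite | github.com/aepaysinger/code-challenges | code_challenges/code_wars/directions_reduction.py | directions_reduction_a
-- ===== SOURCE A (Python) =====
-- def directions_reduction_a(directions):
--     new_directions = []
--
--     for direction in directions:
--         if new_directions == []:
--             new_directions.append(direction)
--         elif direction == "NORTH" and new_directions[-1] == "SOUTH":
--             new_directions.pop(-1)
--         elif direction == "EAST" and new_directions[-1] == "WEST":
--             new_directions.pop(-1)
--         elif direction == "SOUTH" and new_directions[-1] == "NORTH":
--             new_directions.pop(-1)
--         elif direction == "WEST" and new_directions[-1] == "EAST":
--             new_directions.pop(-1)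
--         else:
--             new_directions.append(direction)
--
--     return new_directions
-- ===== SOURCE B (Python) =====
-- OPP = {("NORTH", "SOUTH"), ("SOUTH", "NORTH"), ("EAST", "WEST"), ("WEST", "EAST")}
--
--
-- def _find_splice(xs):
--     """Return xs with the first adjacent opposite pair removed, or None if there is none."""
--     for i in range(len(xs) - 1):
--         if (xs[i], xs[i + 1]) in OPP:
--             return xs[:i] + xs[i + 2:]
--     return None
--
--
-- def directions_reduction_a(directions):
--     xs = list(directions)
--     while True:
--         ys = _find_splice(xs)
--         if ys is None:
--             return xs
--         xs = ys
-- ===== Notes on version B (the rewrite author's own statement) =====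
-- stated objective: alternative
-- what changed: Replaces A's single left-to-right stack pass with repeated scanning for the first adjacent opposite pair and splicing it out until no pair remains (equal by confluence of adjacent-pair cancellation); also leaves the argument unmutated.
import Mathlib
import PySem

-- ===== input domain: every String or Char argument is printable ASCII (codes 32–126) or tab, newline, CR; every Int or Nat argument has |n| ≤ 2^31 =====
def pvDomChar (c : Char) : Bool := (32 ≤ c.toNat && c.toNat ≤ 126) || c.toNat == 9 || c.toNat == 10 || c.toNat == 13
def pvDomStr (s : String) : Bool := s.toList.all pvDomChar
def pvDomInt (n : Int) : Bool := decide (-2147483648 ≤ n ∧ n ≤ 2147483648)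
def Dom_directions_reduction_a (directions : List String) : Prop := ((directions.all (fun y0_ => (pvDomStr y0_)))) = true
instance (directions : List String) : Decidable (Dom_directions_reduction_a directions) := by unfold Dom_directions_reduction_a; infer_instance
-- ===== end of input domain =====

-- B replaces A's stack pass by repeatedly splicing out the first adjacent opposite pair
-- until none remains (objective: alternative decomposition, same result).


-- ===== PORT A =====
-- A's loop body: the four pop branches test new_directions[-1]; new_directions is
-- nonempty there (first branch), so pop(-1) is ported as dropLast (exact for nonempty).
def stepA (nd : List String) (d : String) : List String :=
  if nd = [] then nd ++ [d]
  else if d = "NORTH" ∧ PySem.List.pyGet? nd (-1) = some "SOUTH" then nd.dropLast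
  else if d = "EAST" ∧ PySem.List.pyGet? nd (-1) = some "WEST" then nd.dropLast
  else if d = "SOUTH" ∧ PySem.List.pyGet? nd (-1) = some "NORTH" then nd.dropLast
  else if d = "WEST" ∧ PySem.List.pyGet? nd (-1) = some "EAST" then nd.dropLast
  else nd ++ [d]

def directions_reduction_a (directions : List String) : List String :=
  directions.foldl stepA []

-- ===== PORT B =====
def opp (a b : String) : Bool :=
  (a == "NORTH" && b == "SOUTH") || (a == "SOUTH" && b == "NORTH") ||
  (a == "EAST" && b == "WEST") || (a == "WEST" && b == "EAST")

-- _find_splice: first adjacent opposite pair removed, or none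
def findSplice : List String → Option (List String)
  | a :: b :: rest => if opp a b then some rest else (findSplice (b :: rest)).map (a :: ·)
  | _ => none

theorem findSplice_length : ∀ {xs ys : List String}, findSplice xs = some ys →
    ys.length + 2 = xs.length := by
  intro xs
  induction xs with
  | nil => intro ys h; simp [findSplice] at h
  | cons a t ih =>
    intro ys h
    match t with
    | [] => simp [findSplice] at h
    | b :: rest =>
      simp only [findSplice] at h
      split at h
      · cases h; simp
      · rcases Option.map_eq_some_iff.mp h with ⟨zs, hz, rfl⟩
        have := ih hz
        simp at this ⊢
        omega

-- the while-true loop of B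
def bLoop (xs : List String) : List String :=
  match h : findSplice xs with
  | none => xs
  | some ys => bLoop ys
termination_by xs.length
decreasing_by
  have := findSplice_length h
  omega

def directions_reduction_a_alt (directions : List String) : List String :=
  bLoop directions

-- ===== PRECONDITION & SPEC =====
def Spec_directions_reduction_a (directions : List String) (out : List String) : Prop := out = directions_reduction_a_alt directions
instance (directions : List String) (out : List String) : Decidable (Spec_directions_reduction_a directions out) := by unfold Spec_directions_reduction_a; infer_instance

-- ===== CLAIM (what is proved, stated in full; the proofs are below) =====
def Claim_equal_directions_reduction_a : Prop := ∀ (directions : List String), Dom_directions_reduction_a directions → Spec_directions_reduction_a directions (directions_reduction_a directions)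

-- ===== LEMMAS AND PROOFS =====

-- "reduced": no adjacent opposite pair
def Red (xs : List String) : Prop := List.IsChain (fun a b => opp a b = false) xs

theorem opp_iff (a b : String) : opp a b = true ↔
    (a = "NORTH" ∧ b = "SOUTH") ∨ (a = "SOUTH" ∧ b = "NORTH") ∨
    (a = "EAST" ∧ b = "WEST") ∨ (a = "WEST" ∧ b = "EAST") := by
  simp [opp]; tauto

theorem opp_symm (a b : String) : opp a b = opp b a := by
  rw [Bool.eq_iff_iff, opp_iff, opp_iff]
  tauto

theorem opp_det {a b l : String} (h1 : opp a b = true) (h2 : opp a l = true) : b = l := by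
  rcases (opp_iff a b).mp h1 with ⟨rfl, rfl⟩ | ⟨rfl, rfl⟩ | ⟨rfl, rfl⟩ | ⟨rfl, rfl⟩ <;>
    simp [opp] at h2 <;> exact h2.symm

-- stepA rewritten through opp, on the two shapes of the accumulator
theorem stepA_nil (d : String) : stepA [] d = [d] := by simp [stepA]

theorem stepA_snoc (ys : List String) (l d : String) :
    stepA (ys ++ [l]) d = if opp d l then ys else ys ++ [l, d] := by
  have hne : ys ++ [l] ≠ [] := by simp
  have hget : PySem.List.pyGet? (ys ++ [l]) (-1) = some l := by
    simp [PySem.List.pyGet?, PySem.List.pyIdx?]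
  by_cases h : opp d l = true
  · rw [if_pos h]
    rcases (opp_iff d l).mp h with ⟨rfl, rfl⟩ | ⟨rfl, rfl⟩ | ⟨rfl, rfl⟩ | ⟨rfl, rfl⟩ <;>
      simp [stepA, hne, hget]
  · rw [if_neg h]
    rw [opp_iff] at h
    simp only [stepA, hne, hget, Option.some.injEq]
    push Not at h
    obtain ⟨h1, h2, h3, h4⟩ := h
    rw [if_neg, if_neg, if_neg, if_neg] <;> simp_all

theorem red_step {acc : List String} (h : Red acc) (d : String) : Red (stepA acc d) := by
  rcases List.eq_nil_or_concat' acc with rfl | ⟨ys, l, rfl⟩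
  · rw [stepA_nil]; exact List.isChain_singleton _
  · rw [stepA_snoc]
    by_cases hdl : opp d l = true
    · rw [if_pos hdl]
      exact (List.isChain_append.mp h).1
    · rw [if_neg hdl]
      have : ys ++ [l, d] = (ys ++ [l]) ++ [d] := by simp
      rw [this]
      refine List.isChain_append.mpr ⟨h, by simp, ?_⟩
      intro x hx y hy
      simp at hy
      subst hy
      simp [List.getLast?_append] at hx
      subst hx
      rw [opp_symm]
      exact Bool.eq_false_iff.mpr hdl

theorem step2 {acc : List String} {a b : String} (hr : Red acc) (h : opp a b = true) :
    stepA (stepA acc a) b = acc := by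
  rcases List.eq_nil_or_concat' acc with rfl | ⟨ys, l, rfl⟩
  · rw [stepA_nil]
    have : [a] = ([] : List String) ++ [a] := rfl
    rw [this, stepA_snoc, if_pos (by rw [opp_symm]; exact h)]
  · rw [stepA_snoc]
    by_cases hal : opp a l = true
    · rw [if_pos hal]
      have hbl : b = l := opp_det h hal
      subst hbl
      rcases List.eq_nil_or_concat' ys with rfl | ⟨zs, l', rfl⟩
      · rw [stepA_nil]; simp
      · have hred := List.isChain_append.mp (show Red ((zs ++ [l']) ++ [b]) from hr)
        have hlb := hred.2.2 l' (by simp [List.getLast?_append]) b (by simp)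
        rw [stepA_snoc, if_neg (by rw [opp_symm, hlb]; simp)]
        simp
    · rw [if_neg hal]
      have hsh : ys ++ [l, a] = (ys ++ [l]) ++ [a] := by simp
      rw [hsh, stepA_snoc, if_pos (by rw [opp_symm]; exact h)]

theorem foldl_splice : ∀ {xs ys : List String}, findSplice xs = some ys →
    ∀ acc : List String, Red acc → xs.foldl stepA acc = ys.foldl stepA acc := by
  intro xs
  induction xs with
  | nil => intro ys h; simp [findSplice] at h
  | cons a t ih =>
    intro ys h acc hacc
    match t with
    | [] => simp [findSplice] at h
    | b :: rest =>
      simp only [findSplice] at h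
      by_cases hab : opp a b = true
      · rw [if_pos hab, Option.some.injEq] at h
        subst h
        simp only [List.foldl_cons]
        rw [step2 hacc hab]
      · rw [if_neg hab] at h
        rcases Option.map_eq_some_iff.mp h with ⟨zs, hz, rfl⟩
        simp only [List.foldl_cons]
        exact ih hz (stepA acc a) (red_step hacc a)

theorem red_foldl_id : ∀ (xs acc : List String), Red (acc ++ xs) →
    xs.foldl stepA acc = acc ++ xs := by
  intro xs
  induction xs with
  | nil => intro acc _; simp
  | cons d rest ih =>
    intro acc h
    have hstep : stepA acc d = acc ++ [d] := by
      rcases List.eq_nil_or_concat' acc with rfl | ⟨ys, l, rfl⟩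
      · rw [stepA_nil]; rfl
      · have hred := List.isChain_append.mp (show Red ((ys ++ [l]) ++ d :: rest) by simpa using h)
        have hld := hred.2.2 l (by simp [List.getLast?_append]) d (by simp)
        rw [stepA_snoc, if_neg (by rw [opp_symm, hld]; simp)]
        simp
    simp only [List.foldl_cons, hstep]
    rw [ih (acc ++ [d]) (by simpa using h)]
    simp

theorem findSplice_none_red : ∀ {xs : List String}, findSplice xs = none → Red xs := by
  intro xs
  induction xs with
  | nil => intro _; exact List.isChain_nil
  | cons a t ih =>
    intro h
    match t with
    | [] => exact List.isChain_singleton _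
    | b :: rest =>
      simp only [findSplice] at h
      by_cases hab : opp a b = true
      · rw [if_pos hab] at h; cases h
      · rw [if_neg hab, Option.map_eq_none_iff] at h
        exact List.isChain_cons_cons.mpr ⟨Bool.eq_false_iff.mpr hab, ih h⟩

theorem foldl_eq_bLoop (xs : List String) : xs.foldl stepA [] = bLoop xs := by
  induction xs using bLoop.induct with
  | case1 xs h =>
    rw [bLoop.eq_def]
    split
    · exact red_foldl_id xs [] (by simpa using findSplice_none_red h)
    · rename_i ys h'; rw [h] at h'; cases h'
  | case2 xs ys h ih =>
    rw [bLoop.eq_def]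
    split
    · rename_i h'; rw [h] at h'; cases h'
    · rename_i zs h'
      rw [h] at h'
      cases h'
      rw [← ih]
      exact foldl_splice h [] List.isChain_nil

-- ===== VERDICT (by name: the statement is the Claim_ definition above) =====
theorem directions_reduction_a_spec : Claim_equal_directions_reduction_a := by
  intro xs _
  unfold Spec_directions_reduction_a directions_reduction_a directions_reduction_a_alt
  exact foldl_eq_bLoop xs
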